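-- pv_equiv track=rewrite | github.com/valentingol/docstripy | docstripy/difference.py | satenize_ranges
-- ===== SOURCE A (Python) =====
-- from typing import List, Tuple, Union
--
-- def satenize_ranges(ranges: List[List[int]]) -> List[List[int]]:
--     """Check if the ranges are overlapping."""
--     for i, range1 in enumerate(ranges):
--         for range2 in ranges[i + 1 :]:
--             if range1[0] <= range2[0] < range1[1]:
--                 raise ValueError("Found overlapping ranges.")
--             if range2[0] <= range1[0] < range2[1]:
--                 raise ValueError("Found overlapping ranges.")
--     return ranges
-- ===== SOURCE B (Python) =====
-- def satenize_ranges(ranges):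
--     """Check if the ranges are overlapping."""
--     pairs = sorted((r[0], r[1]) for r in ranges)
--     for (s1, e1), (s2, e2) in zip(pairs, pairs[1:]):
--         if s1 <= s2 < e1 or s2 <= s1 < e2:
--             raise ValueError("Found overlapping ranges.")
--     return ranges
-- ===== Notes on version B (the rewrite author's own statement) =====
-- stated objective: faster
-- what changed: Replaces the all-pairs O(n^2) overlap scan by sorting the (start, end) pairs once and checking only adjacent pairs of the sorted list.
-- outside the precondition, e.g. on satenize_ranges([[0, 1], [5]]): A returns [[0, 1], [5]], B raises IndexError; on satenize_ranges([[]]): A returns [[]], B raises IndexError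
import Mathlib
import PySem

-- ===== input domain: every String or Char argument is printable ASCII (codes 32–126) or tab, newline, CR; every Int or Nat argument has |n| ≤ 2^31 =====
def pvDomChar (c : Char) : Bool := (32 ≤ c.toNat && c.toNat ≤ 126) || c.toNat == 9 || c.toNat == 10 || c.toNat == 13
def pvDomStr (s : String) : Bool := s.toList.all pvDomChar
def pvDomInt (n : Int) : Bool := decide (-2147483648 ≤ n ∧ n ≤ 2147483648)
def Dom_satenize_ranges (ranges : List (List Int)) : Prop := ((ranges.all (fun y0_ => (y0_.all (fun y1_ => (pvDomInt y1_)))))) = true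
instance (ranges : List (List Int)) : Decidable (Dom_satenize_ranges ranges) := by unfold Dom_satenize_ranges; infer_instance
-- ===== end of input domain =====

-- B replaces A's all-pairs O(n^2) overlap scan by a sort of the (start, end) pairs
-- followed by a single adjacent-pair scan; equivalence is about the return value on
-- inputs where A returns normally (Pre_ below).

-- ===== PORT A =====
-- In the ports, a `none`/`[]` result stands exactly where the Python raises
-- (ValueError on overlap, IndexError on a too-short range); those inputs are outside Pre_.

-- second `if` of A's inner loop body: `if range2[0] <= range1[0] < range2[1]: raise`
def aSecond (a b : Int) (r2 : List Int) : Option Unit :=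
  if b ≤ a then
    match PySem.List.pyGet? r2 1 with
    | none => none
    | some d => if a < d then none else some ()
  else some ()

-- one inner-loop body: both `if` tests for the pair (range1, range2), with Python's
-- short-circuit order of the index accesses
def aPair (r1 r2 : List Int) : Option Unit :=
  match PySem.List.pyGet? r1 0 with
  | none => none
  | some a =>
    match PySem.List.pyGet? r2 0 with
    | none => none
    | some b =>
      if a ≤ b then
        match PySem.List.pyGet? r1 1 with
        | none => none
        | some c => if b < c then none else aSecond a b r2
      else aSecond a b r2

-- `for range2 in ranges[i + 1:]`
def aInner (r1 : List Int) : List (List Int) → Option Unit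
  | [] => some ()
  | r2 :: rest => match aPair r1 r2 with
    | none => none
    | some _ => aInner r1 rest

-- `for i, range1 in enumerate(ranges)` (range2 runs over the suffix after range1)
def aOuter : List (List Int) → Option Unit
  | [] => some ()
  | r1 :: rest => match aInner r1 rest with
    | none => none
    | some _ => aOuter rest

def satenize_ranges (ranges : List (List Int)) : List (List Int) :=
  match aOuter ranges with
  | none => []          -- Python raises here (outside Pre_)
  | some _ => ranges

-- ===== PORT B =====
-- `(r[0], r[1]) for r in ranges`
def bPair? (r : List Int) : Option (Int × Int) :=
  match PySem.List.pyGet? r 0 with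
  | none => none
  | some s =>
    match PySem.List.pyGet? r 1 with
    | none => none
    | some e => some (s, e)

-- the adjacent-pair scan `for (s1, e1), (s2, e2) in zip(pairs, pairs[1:])`; true = overlap found
def bAdj : List (Int × Int) → Bool
  | (s1, e1) :: (s2, e2) :: rest =>
    if (s1 ≤ s2 ∧ s2 < e1) ∨ (s2 ≤ s1 ∧ s1 < e2) then true else bAdj ((s2, e2) :: rest)
  | _ => false

def satenize_ranges_alt (ranges : List (List Int)) : List (List Int) :=
  match ranges.mapM bPair? with
  | none => []          -- Python raises IndexError here (outside Pre_)
  | some pairs =>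
    if bAdj (PySem.List.sorted2 pairs Prod.fst Prod.snd) then []   -- Python raises ValueError here (outside Pre_)
    else ranges

-- ===== PRECONDITION & SPEC =====
def pairOf (r : List Int) : Int × Int := (r.getD 0 0, r.getD 1 0)

def noOvP (p q : Int × Int) : Prop :=
  ¬ ((p.1 ≤ q.1 ∧ q.1 < p.2) ∨ (q.1 ≤ p.1 ∧ p.1 < q.2))

-- Pre_ excludes the inputs on which A raises (ValueError on an overlapping pair,
-- IndexError on a too-short range), and also too-short ranges on which A happens to
-- return only because short-circuiting skips the missing index (e.g. [[0,1],[5]]):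
-- there a range is not a [start, end) interval and B's natural scan raises IndexError.
def Pre_satenize_ranges (ranges : List (List Int)) : Prop :=
  (∀ r ∈ ranges, 2 ≤ r.length) ∧
  ranges.Pairwise (fun r1 r2 => noOvP (pairOf r1) (pairOf r2))

instance (ranges : List (List Int)) : Decidable (Pre_satenize_ranges ranges) := by
  unfold Pre_satenize_ranges noOvP; infer_instance

def pvWitness_satenize_ranges : List (List Int) := [[3, 5], [0, 2], [5, 9]]

def Spec_satenize_ranges (ranges : List (List Int)) (out : List (List Int)) : Prop := out = satenize_ranges_alt ranges
instance (ranges : List (List Int)) (out : List (List Int)) : Decidable (Spec_satenize_ranges ranges out) := by unfold Spec_satenize_ranges; infer_instance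

-- ===== CLAIM (what is proved, stated in full; the proofs are below) =====
def Claim_equal_satenize_ranges : Prop := ∀ (ranges : List (List Int)), Dom_satenize_ranges ranges → Pre_satenize_ranges ranges → Spec_satenize_ranges ranges (satenize_ranges ranges)

-- ===== LEMMAS AND PROOFS =====

theorem pyGet?_len2_0 (r : List Int) (h : 2 ≤ r.length) :
    PySem.List.pyGet? r 0 = some (r.getD 0 0) := by
  match r, h with
  | a :: b :: t, _ =>
    have h0 : (0:Int) ≤ (t.length:Int) + 1 := by omega
    simp [PySem.List.pyGet?, PySem.List.pyIdx?, h0]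

theorem pyGet?_len2_1 (r : List Int) (h : 2 ≤ r.length) :
    PySem.List.pyGet? r 1 = some (r.getD 1 0) := by
  match r, h with
  | a :: b :: t, _ =>
    simp [PySem.List.pyGet?, PySem.List.pyIdx?]

theorem aPair_ok (r1 r2 : List Int) (h1 : 2 ≤ r1.length) (h2 : 2 ≤ r2.length)
    (hno : noOvP (pairOf r1) (pairOf r2)) : aPair r1 r2 = some () := by
  unfold noOvP pairOf at hno
  simp only [not_or, not_and, not_lt] at hno
  unfold aPair aSecond
  rw [pyGet?_len2_0 r1 h1, pyGet?_len2_0 r2 h2, pyGet?_len2_1 r1 h1, pyGet?_len2_1 r2 h2]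
  simp only
  split_ifs with h h' h'' h''' h'''' <;> first | rfl | (exfalso; omega)

theorem aInner_ok (r1 : List Int) (rest : List (List Int))
    (h1 : 2 ≤ r1.length) (h : ∀ r2 ∈ rest, 2 ≤ r2.length ∧ noOvP (pairOf r1) (pairOf r2)) :
    aInner r1 rest = some () := by
  induction rest with
  | nil => rfl
  | cons r2 t ih =>
    have hr2 := h r2 (by simp)
    unfold aInner
    rw [aPair_ok r1 r2 h1 hr2.1 hr2.2]
    exact ih (fun r hr => h r (by simp [hr]))

theorem aOuter_ok (ranges : List (List Int)) (hpre : Pre_satenize_ranges ranges) :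
    aOuter ranges = some () := by
  obtain ⟨hlen, hpw⟩ := hpre
  induction ranges with
  | nil => rfl
  | cons r1 rest ih =>
    rw [List.pairwise_cons] at hpw
    unfold aOuter
    rw [aInner_ok r1 rest (hlen r1 (by simp))
      (fun r2 hr2 => ⟨hlen r2 (by simp [hr2]), hpw.1 r2 hr2⟩)]
    exact ih (fun r hr => hlen r (by simp [hr])) hpw.2

theorem bPair?_ok (r : List Int) (h : 2 ≤ r.length) : bPair? r = some (pairOf r) := by
  unfold bPair? pairOf
  rw [pyGet?_len2_0 r h, pyGet?_len2_1 r h]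

theorem mapM_bPair?_ok (ranges : List (List Int)) (h : ∀ r ∈ ranges, 2 ≤ r.length) :
    ranges.mapM bPair? = some (ranges.map pairOf) := by
  induction ranges with
  | nil => rfl
  | cons r rest ih =>
    rw [List.mapM_cons, bPair?_ok r (h r (by simp)), ih (fun r' hr' => h r' (by simp [hr']))]
    rfl

theorem noOvP_symm : Symmetric noOvP := by
  intro p q h
  unfold noOvP at *
  tauto

theorem bAdj_of_pairwise (l : List (Int × Int)) (h : l.Pairwise noOvP) : bAdj l = false := by
  induction l with
  | nil => rfl
  | cons p t ih =>
    rw [List.pairwise_cons] at h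
    match t, h with
    | [], _ => rfl
    | q :: t', ⟨hhead, htail⟩ =>
      have hpq : noOvP p q := hhead q (by simp)
      unfold noOvP at hpq
      unfold bAdj
      rw [if_neg hpq]
      exact ih htail

-- ===== VERDICT (by name: the statement is the Claim_ definition above) =====
theorem satenize_ranges_spec : Claim_equal_satenize_ranges := by
  intro ranges _hdom hpre
  unfold Spec_satenize_ranges satenize_ranges satenize_ranges_alt
  obtain ⟨hlen, hpw⟩ := hpre
  rw [aOuter_ok ranges ⟨hlen, hpw⟩, mapM_bPair?_ok ranges hlen]
  have hpwP : (ranges.map pairOf).Pairwise noOvP := by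
    rw [List.pairwise_map]; exact hpw
  have hperm : (PySem.List.sorted2 (ranges.map pairOf) Prod.fst Prod.snd).Perm (ranges.map pairOf) :=
    PySem.List.sorted2_perm _ _ _ _
  have := bAdj_of_pairwise _ ((hperm.pairwise_iff (fun {p q} => noOvP_symm (x := p) (y := q))).mpr hpwP)
  simp only [this]
  rfl
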